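-- pv_equiv track=rewrite | github.com/sentrip/pygamehack | pygamehack/struct_parser.py | _create_lines
-- ===== SOURCE A (Python) =====
-- def _create_lines(previous_lines, max_length):
--     lines = []
--     for i, line in enumerate(previous_lines):
--         if i < max_length:
--             lines.append(line)
--         else:
--             lines[-1] += '\n%s' % line
--     return lines
-- ===== SOURCE B (Python) =====
-- def _create_lines(previous_lines, max_length):
--     head = list(previous_lines[:max_length])
--     rest = list(previous_lines[max_length:])
--     if rest:
--         head[-1] = '\n'.join([head[-1]] + rest)
--     return head
-- ===== Notes on version B (the rewrite author's own statement) =====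
-- stated objective: faster
-- what changed: The per-element indexed loop that appends or string-concatenates one overflow line at a time is replaced by two slices plus a single '\n'.join of the overflow onto the last kept line, removing the repeated re-concatenation of the growing last string.
import Mathlib
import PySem

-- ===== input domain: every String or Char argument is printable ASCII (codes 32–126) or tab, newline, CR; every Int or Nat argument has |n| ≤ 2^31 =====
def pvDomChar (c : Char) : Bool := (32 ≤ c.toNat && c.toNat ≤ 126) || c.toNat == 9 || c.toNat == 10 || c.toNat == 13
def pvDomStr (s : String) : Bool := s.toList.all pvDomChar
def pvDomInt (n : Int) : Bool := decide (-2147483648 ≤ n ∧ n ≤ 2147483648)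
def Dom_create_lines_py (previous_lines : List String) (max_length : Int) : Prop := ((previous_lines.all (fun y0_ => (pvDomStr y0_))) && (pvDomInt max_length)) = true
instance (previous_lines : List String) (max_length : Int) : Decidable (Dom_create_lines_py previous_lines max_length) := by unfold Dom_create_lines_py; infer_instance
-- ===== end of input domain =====

-- B replaces A's per-element indexed loop by two slices plus one '\n'.join (simpler decomposition, same result).

-- ===== PORT A =====
-- the for-loop over enumerate(previous_lines), carrying the index i and the accumulator `lines`
def pvALoop (m : Int) : Nat → List String → List String → List String
  | _, lines, [] => lines
  | i, lines, line :: rest =>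
    if (i : Int) < m then pvALoop m (i + 1) (lines ++ [line]) rest
    else
      match PySem.List.pyGet? lines (-1) with
      | some last => pvALoop m (i + 1) (lines.dropLast ++ [last ++ "\n" ++ line]) rest
      | none => lines   -- Python raises IndexError here (excluded by Pre_)

def create_lines_py (previous_lines : List String) (max_length : Int) : List String :=
  pvALoop max_length 0 [] previous_lines

-- ===== PORT B =====
def create_lines_py_alt (previous_lines : List String) (max_length : Int) : List String :=
  let head := PySem.List.slice previous_lines none (some max_length)
  let rest := PySem.List.slice previous_lines (some max_length) none
  if rest.isEmpty then head
  else
    match PySem.List.pyGet? head (-1) with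
    | some last => head.dropLast ++ [PySem.Str.join "\n" (last :: rest)]  -- head[-1] = '\n'.join([head[-1]] + rest)
    | none => head   -- Python raises IndexError here (excluded by Pre_)

-- ===== PRECONDITION & SPEC =====
-- A raises IndexError (lines[-1] on the empty accumulator) whenever previous_lines is non-empty and max_length ≤ 0.
def Pre_create_lines_py (previous_lines : List String) (max_length : Int) : Prop :=
  previous_lines = [] ∨ 1 ≤ max_length
instance (previous_lines : List String) (max_length : Int) : Decidable (Pre_create_lines_py previous_lines max_length) := by unfold Pre_create_lines_py; infer_instance

def pvWitness_create_lines_py : List String × Int := (["a", "b", "c"], 2)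

def Spec_create_lines_py (previous_lines : List String) (max_length : Int) (out : List String) : Prop := out = create_lines_py_alt previous_lines max_length
instance (previous_lines : List String) (max_length : Int) (out : List String) : Decidable (Spec_create_lines_py previous_lines max_length out) := by unfold Spec_create_lines_py; infer_instance

-- ===== CLAIM (what is proved, stated in full; the proofs are below) =====
def Claim_equal_create_lines_py : Prop := ∀ (previous_lines : List String) (max_length : Int), Dom_create_lines_py previous_lines max_length → Pre_create_lines_py previous_lines max_length → Spec_create_lines_py previous_lines max_length (create_lines_py previous_lines max_length)

-- ===== LEMMAS AND PROOFS =====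

-- specification skeleton of the loop: keep a budget of t more whole lines, then merge the tail into the last one
def pvCore (s : String) (xs : List String) (t : Nat) : List String :=
  match xs, t with
  | [], _ => [s]
  | x :: xs, 0 => [PySem.Str.join "\n" (s :: x :: xs)]
  | x :: xs, t + 1 => s :: pvCore x xs t

theorem pv_join_shift (s x : String) (rest : List String) :
    PySem.Str.join "\n" (s :: x :: rest) = PySem.Str.join "\n" ((s ++ "\n" ++ x) :: rest) := by
  cases rest with
  | nil => simp [PySem.Str.join, PySem.Chars.join_cons_cons, PySem.Chars.join_singleton]
  | cons y ys => simp [PySem.Str.join, PySem.Chars.join_cons_cons]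

theorem pvALoop_merge (m : Int) (xs : List String) :
    ∀ (i : Nat) (l0 : List String) (s : String), m ≤ (i : Int) →
      pvALoop m i (l0 ++ [s]) xs = l0 ++ [PySem.Str.join "\n" (s :: xs)] := by
  induction xs with
  | nil => intro i l0 s _; simp [pvALoop, PySem.Str.join, PySem.Chars.join_singleton]
  | cons x xs ih =>
    intro i l0 s h
    have hnot : ¬ ((i : Int) < m) := by omega
    simp only [pvALoop, hnot, if_false, PySem.List.pyGet?_neg_one_append_singleton]
    rw [List.dropLast_concat]
    rw [ih (i + 1) l0 (s ++ "\n" ++ x) (by push_cast; omega)]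
    rw [pv_join_shift]

theorem pvALoop_core (m : Int) (xs : List String) :
    ∀ (i : Nat) (l0 : List String) (s : String), (i : Int) ≤ m →
      pvALoop m i (l0 ++ [s]) xs = l0 ++ pvCore s xs (m - i).toNat := by
  induction xs with
  | nil => intro i l0 s _; simp [pvALoop, pvCore]
  | cons x xs ih =>
    intro i l0 s h
    by_cases hlt : (i : Int) < m
    · have ht : (m - i).toNat = (m - (i + 1 : Nat)).toNat + 1 := by push_cast; omega
      simp only [pvALoop, hlt, if_true]
      have : l0 ++ [s] ++ [x] = (l0 ++ [s]) ++ [x] := rfl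
      rw [this, ih (i + 1) (l0 ++ [s]) x (by push_cast; omega), ht]
      simp [pvCore]
    · have heq : m ≤ (i : Int) := by omega
      have ht : (m - i).toNat = 0 := by omega
      rw [pvALoop_merge m (x :: xs) i l0 s heq, ht]
      simp [pvCore]

theorem pvCore_eq_B (xs : List String) :
    ∀ (s : String) (t : Nat),
      pvCore s xs t =
        (if (xs.drop t).isEmpty then s :: xs.take t
         else
           match PySem.List.pyGet? (s :: xs.take t) (-1) with
           | some last => (s :: xs.take t).dropLast ++ [PySem.Str.join "\n" (last :: xs.drop t)]
           | none => s :: xs.take t) := by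
  induction xs with
  | nil => intro s t; simp [pvCore]
  | cons x xs ih =>
    intro s t
    cases t with
    | zero =>
      have : PySem.List.pyGet? [s] (-1) = some s :=
        PySem.List.pyGet?_neg_one_append_singleton [] s
      simp [pvCore, this]
    | succ t =>
      rw [show pvCore s (x :: xs) (t + 1) = s :: pvCore x xs t from rfl, ih x t]
      by_cases hd : (xs.drop t).isEmpty
      · simp [hd]
      · have h1 : PySem.List.pyGet? (s :: x :: xs.take t) (-1)
            = PySem.List.pyGet? (x :: xs.take t) (-1) := by
          simp [PySem.List.pyGet?_neg_one]
        have hlast : PySem.List.pyGet? (x :: xs.take t) (-1)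
            = some ((x :: xs.take t).getLast (by simp)) := by
          rw [PySem.List.pyGet?_neg_one, List.getLast?_eq_some_getLast]
        simp only [List.take_succ_cons, List.drop_succ_cons, hd, h1, hlast]
        simp

theorem create_lines_py_eq_core (y : String) (ys : List String) (m : Int) (hm : 1 ≤ m) :
    create_lines_py (y :: ys) m = pvCore y ys (m - 1).toNat := by
  unfold create_lines_py
  have h0 : (0 : Int) < m := by omega
  simp only [pvALoop, Nat.cast_zero, h0, if_true, List.nil_append]
  have := pvALoop_core m ys 1 [] y (by push_cast; omega)
  simpa using this

theorem create_lines_py_alt_eq_core (y : String) (ys : List String) (m : Int) (hm : 1 ≤ m) :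
    create_lines_py_alt (y :: ys) m = pvCore y ys (m - 1).toNat := by
  unfold create_lines_py_alt
  have h0 : (0 : Int) ≤ m := by omega
  rw [PySem.List.slice_to _ h0, PySem.List.slice_from _ h0]
  have hmn : m.toNat = (m - 1).toNat + 1 := by omega
  rw [hmn]
  simp only [List.take_succ_cons, List.drop_succ_cons]
  rw [pvCore_eq_B]

-- ===== VERDICT =====
theorem create_lines_py_spec : Claim_equal_create_lines_py := by
  intro l m _ hpre
  unfold Spec_create_lines_py
  rcases hpre with rfl | hm
  · simp [create_lines_py, pvALoop, create_lines_py_alt, PySem.List.slice]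
  · cases l with
    | nil => simp [create_lines_py, pvALoop, create_lines_py_alt, PySem.List.slice]
    | cons y ys =>
      rw [create_lines_py_eq_core y ys m hm, create_lines_py_alt_eq_core y ys m hm]
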